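-- pv_equiv track=rewrite | github.com/ishine/Speaker-Diarization | speakerDiarization.py | arrangeResult
-- ===== SOURCE A (Python) =====
-- def append2dict(speakerSlice, spk_period):
--     key = list(spk_period.keys())[0]
--     value = list(spk_period.values())[0]
--     if(key in speakerSlice):
--         speakerSlice[key].append(value)
--     else:
--         speakerSlice[key] = [value]
--
--     return speakerSlice
--
-- def arrangeResult(labels, time_spec_rate): # {'1': [(10, 20), (30, 40)], '2': [(90, 100)]}
--     lastLabel = labels[0]
--     speakerSlice = {}
--     j = 0
--     for i,label in enumerate(labels):
--         if(label==lastLabel):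
--             continue
--         speakerSlice = append2dict(speakerSlice, {lastLabel: (time_spec_rate*j,time_spec_rate*i)})
--         j = i
--         lastLabel = label
--
--     speakerSlice = append2dict(speakerSlice, {lastLabel: (time_spec_rate*j,time_spec_rate*(len(labels)))})
--     return speakerSlice
-- ===== SOURCE B (Python) =====
-- def arrangeResult(labels, time_spec_rate):
--     # Pass 1: run-length encode the label sequence.
--     runs = []
--     cur = None
--     count = 0
--     for label in labels:
--         if count and label == cur:
--             count += 1
--         else:
--             if count:
--                 runs.append((cur, count))
--             cur, count = label, 1
--     if count:
--         runs.append((cur, count))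
--     # Pass 2: turn each run into a time interval.
--     speakerSlice = {}
--     start = 0
--     for label, n in runs:
--         end = start + n
--         speakerSlice.setdefault(label, []).append((time_spec_rate*start, time_spec_rate*end))
--         start = end
--     return speakerSlice
-- ===== Notes on version B (the rewrite author's own statement) =====
-- stated objective: alternative
-- what changed: B replaces A's single sentinel loop (lastLabel/j bookkeeping plus the append2dict helper) by two passes: run-length encode the labels, then turn each run into an interval with dict.setdefault.
import Mathlib
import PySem

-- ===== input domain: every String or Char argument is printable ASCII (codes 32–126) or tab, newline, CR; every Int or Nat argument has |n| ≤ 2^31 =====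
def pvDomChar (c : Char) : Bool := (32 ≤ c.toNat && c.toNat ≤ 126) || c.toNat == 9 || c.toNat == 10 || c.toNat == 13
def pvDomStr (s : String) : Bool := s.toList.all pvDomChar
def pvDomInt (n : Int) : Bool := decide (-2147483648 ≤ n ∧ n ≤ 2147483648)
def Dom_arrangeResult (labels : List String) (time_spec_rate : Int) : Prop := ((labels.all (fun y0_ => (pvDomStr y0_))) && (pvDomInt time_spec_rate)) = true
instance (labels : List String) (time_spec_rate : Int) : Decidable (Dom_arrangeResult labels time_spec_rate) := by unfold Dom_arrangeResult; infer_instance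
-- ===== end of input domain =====

-- B replaces A's sentinel loop (lastLabel/j + append2dict helper) by two passes: run-length
-- encode the labels, then map runs to intervals with setdefault (alternative decomposition, same cost).


-- ===== PORT A =====
def append2dict (d : PySem.Dict String (List (Int × Int))) (key : String) (value : Int × Int) :
    PySem.Dict String (List (Int × Int)) :=
  if d.contains key then d.modify key [] (fun l => l ++ [value])  -- speakerSlice[key].append(value)
  else d.insert key [value]

-- the for loop over enumerate(labels); the base case is the post-loop append, where i = len(labels)
def arrangeLoop (t : Int) : List String → Int → String → Int →
    PySem.Dict String (List (Int × Int)) → PySem.Dict String (List (Int × Int))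
  | [], i, lastLabel, j, d => append2dict d lastLabel (t * j, t * i)
  | label :: rest, i, lastLabel, j, d =>
    if label == lastLabel then arrangeLoop t rest (i + 1) lastLabel j d
    else arrangeLoop t rest (i + 1) label i (append2dict d lastLabel (t * j, t * i))

def arrangeResult (labels : List String) (time_spec_rate : Int) : List (String × List (Int × Int)) :=
  match PySem.List.pyGet? labels 0 with
  | none => []   -- labels[0] raises IndexError in Python; excluded by Pre_
  | some l0 => (arrangeLoop time_spec_rate labels 0 l0 0 PySem.Dict.empty).items

-- ===== PORT B =====
-- pass 1 loop body: state (runs, cur, count); cur's initial "" is never compared (count = 0 guards it,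
-- exactly as Python's `count and label == cur` short-circuits past the None sentinel)
def altRunsStep (st : List (String × Int) × String × Int) (label : String) :
    List (String × Int) × String × Int :=
  if st.2.2 != 0 && label == st.2.1 then (st.1, st.2.1, st.2.2 + 1)
  else ((if st.2.2 != 0 then st.1 ++ [(st.2.1, st.2.2)] else st.1), label, 1)

-- pass 2 loop body: state (speakerSlice, start); setdefault(label, []).append(v) = modify label [] (· ++ [v])
def altIntervalStep (t : Int) (st : PySem.Dict String (List (Int × Int)) × Int) (p : String × Int) :
    PySem.Dict String (List (Int × Int)) × Int :=
  (st.1.modify p.1 [] (fun l => l ++ [(t * st.2, t * (st.2 + p.2))]), st.2 + p.2)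

def arrangeResult_alt (labels : List String) (time_spec_rate : Int) : List (String × List (Int × Int)) :=
  let st := labels.foldl altRunsStep ([], "", 0)
  let runs := if st.2.2 != 0 then st.1 ++ [(st.2.1, st.2.2)] else st.1
  (runs.foldl (altIntervalStep time_spec_rate) (PySem.Dict.empty, 0)).1.items

-- ===== PRECONDITION & SPEC =====
-- Python A evaluates labels[0] first, so it raises IndexError on the empty list; Pre_ excludes exactly that.
def Pre_arrangeResult (labels : List String) (_time_spec_rate : Int) : Prop := labels ≠ []
instance (labels : List String) (time_spec_rate : Int) : Decidable (Pre_arrangeResult labels time_spec_rate) := by unfold Pre_arrangeResult; infer_instance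
def pvWitness_arrangeResult : List String × Int := (["a", "a", "b"], 10)


def Spec_arrangeResult (labels : List String) (time_spec_rate : Int) (out : List (String × List (Int × Int))) : Prop := out = arrangeResult_alt labels time_spec_rate
instance (labels : List String) (time_spec_rate : Int) (out : List (String × List (Int × Int))) : Decidable (Spec_arrangeResult labels time_spec_rate out) := by unfold Spec_arrangeResult; infer_instance

-- ===== CLAIM (what is proved, stated in full; the proofs are below) =====
def Claim_equal_arrangeResult : Prop := ∀ (labels : List String) (time_spec_rate : Int), Dom_arrangeResult labels time_spec_rate → Pre_arrangeResult labels time_spec_rate → Spec_arrangeResult labels time_spec_rate (arrangeResult labels time_spec_rate)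

-- ===== LEMMAS AND PROOFS =====

-- reference run-length encoding (proof-only)
def rleGo (cur : String) (c : Int) : List String → List (String × Int)
  | [] => [(cur, c)]
  | x :: xs => if x == cur then rleGo cur (c + 1) xs else (cur, c) :: rleGo x 1 xs

-- reference interval builder (proof-only)
def bGo (t : Int) : List (String × Int) → Int → PySem.Dict String (List (Int × Int)) →
    PySem.Dict String (List (Int × Int))
  | [], _, d => d
  | (l, c) :: rs, s, d => bGo t rs (s + c) (d.modify l [] (fun xs => xs ++ [(t * s, t * (s + c))]))

lemma append2dict_eq_modify (d : PySem.Dict String (List (Int × Int))) (k : String) (v : Int × Int) :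
    append2dict d k v = d.modify k [] (fun l => l ++ [v]) := by
  unfold append2dict
  split
  · rfl
  · rename_i h
    have h' : ∀ p ∈ d.items, ¬ (p.1 == k) = true := by
      intro p hp hk
      exact h (by simp only [PySem.Dict.contains, List.any_eq_true]; exact ⟨p, hp, hk⟩)
    have hf : List.find? (fun p => p.1 == k) d.items = none := List.find?_eq_none.mpr h'
    simp [PySem.Dict.modify, PySem.Dict.getD, PySem.Dict.get?, hf]

lemma runs_fold (xs : List String) : ∀ (runs : List (String × Int)) (cur : String) (c : Int),
    1 ≤ c →
    (if (xs.foldl altRunsStep (runs, cur, c)).2.2 != 0 then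
        (xs.foldl altRunsStep (runs, cur, c)).1 ++
          [((xs.foldl altRunsStep (runs, cur, c)).2.1, (xs.foldl altRunsStep (runs, cur, c)).2.2)]
      else (xs.foldl altRunsStep (runs, cur, c)).1) = runs ++ rleGo cur c xs := by
  induction xs with
  | nil =>
    intro runs cur c hc
    simp only [List.foldl_nil, rleGo]
    have : (c != 0) = true := by simp; omega
    simp [this]
  | cons x xs ih =>
    intro runs cur c hc
    simp only [List.foldl_cons, rleGo]
    have hc0 : (c != 0) = true := by simp; omega
    by_cases hx : (x == cur) = true
    · simp only [altRunsStep, hc0, hx, Bool.and_self]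
      simpa [hx] using ih runs cur (c + 1) (by omega)
    · have hxf : (x == cur) = false := by simpa using hx
      simp only [altRunsStep, hxf, Bool.true_and, Bool.false_eq_true, if_false, hc0, if_true]
      rw [ih (runs ++ [(cur, c)]) x 1 (by omega)]
      simp
  
lemma pass2_fold (t : Int) (rs : List (String × Int)) :
    ∀ (s : Int) (d : PySem.Dict String (List (Int × Int))),
    (rs.foldl (altIntervalStep t) (d, s)).1 = bGo t rs s d := by
  induction rs with
  | nil => intro s d; simp [bGo]
  | cons p rs ih => intro s d; cases p; simp [altIntervalStep, bGo, ih]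

lemma arrangeLoop_eq (t : Int) (xs : List String) :
    ∀ (i j : Int) (last : String) (d : PySem.Dict String (List (Int × Int))),
    arrangeLoop t xs i last j d = bGo t (rleGo last (i - j) xs) j d := by
  induction xs with
  | nil =>
    intro i j last d
    simp only [arrangeLoop, rleGo, bGo, append2dict_eq_modify]
    have : j + (i - j) = i := by ring
    rw [this]
  | cons x xs ih =>
    intro i j last d
    by_cases hx : (x == last) = true
    · simp only [arrangeLoop, hx, if_true, rleGo]
      rw [ih (i + 1) j last d]
      have : i + 1 - j = i - j + 1 := by ring
      rw [this]
    · have hxf : (x == last) = false := by simpa using hx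
      simp only [arrangeLoop, hxf, Bool.false_eq_true, if_false, rleGo, bGo,
        append2dict_eq_modify]
      rw [ih (i + 1) i x]
      have h1 : i + 1 - i = 1 := by ring
      have h2 : j + (i - j) = i := by ring
      rw [h1, h2]

-- ===== VERDICT (by name: the statement is the Claim_ definition above) =====
theorem arrangeResult_spec : Claim_equal_arrangeResult := by
  intro labels t _ hpre
  unfold Spec_arrangeResult
  cases labels with
  | nil => exact absurd rfl hpre
  | cons l0 ls =>
    show arrangeResult (l0 :: ls) t = arrangeResult_alt (l0 :: ls) t
    unfold arrangeResult arrangeResult_alt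
    simp only [PySem.List.pyGet?, PySem.List.pyIdx?]
    have hstep : altRunsStep ([], "", 0) l0 = ([], l0, 1) := by simp [altRunsStep]
    have hA : arrangeLoop t (l0 :: ls) 0 l0 0 PySem.Dict.empty
        = bGo t (rleGo l0 1 ls) 0 PySem.Dict.empty := by
      simp only [arrangeLoop, BEq.rfl, if_true]
      have := arrangeLoop_eq t ls 1 0 l0 PySem.Dict.empty
      norm_num at this
      exact this
    have hr := runs_fold ls [] l0 1 (by omega)
    norm_num at hr
    norm_num [List.foldl_cons, hstep, hA, pass2_fold, hr]
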